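-- pv_equiv track=rewrite | github.com/zolinthecow/vest-puzzles | 01/main.py | solve
-- ===== SOURCE A (Python) =====
-- from typing import List
--
-- def solve(statements: List[int]) -> List[int]:
--     candidates: List[List[int]] = []
--     for t in range(11):
--         truthful = [i for i, val in enumerate(statements) if val == t]
--         if len(truthful) == t:
--             candidates.append(truthful)
--     if not candidates:
--         return []
--     candidates.sort(key=lambda arr: (len(arr), arr))
--     return candidates[0]
-- ===== SOURCE B (Python) =====
-- from typing import List
--
-- def solve(statements: List[int]) -> List[int]:
--     counts = [0] * 11
--     for val in statements:
--         if 0 <= val <= 10: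
--             counts[val] += 1
--     for t in range(11):
--         if counts[t] == t:
--             return [i for i, val in enumerate(statements) if val == t]
--     return []
-- ===== Notes on version B (the rewrite author's own statement) =====
-- stated objective: simpler
-- what changed: Replaces A's 11 filtering scans plus building and sorting a candidate list with one counting pass over an 11-slot table followed by a single targeted collection pass for the first t with count[t] == t (the smallest t, which is exactly what A's (len, arr) sort selects).
import Mathlib
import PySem

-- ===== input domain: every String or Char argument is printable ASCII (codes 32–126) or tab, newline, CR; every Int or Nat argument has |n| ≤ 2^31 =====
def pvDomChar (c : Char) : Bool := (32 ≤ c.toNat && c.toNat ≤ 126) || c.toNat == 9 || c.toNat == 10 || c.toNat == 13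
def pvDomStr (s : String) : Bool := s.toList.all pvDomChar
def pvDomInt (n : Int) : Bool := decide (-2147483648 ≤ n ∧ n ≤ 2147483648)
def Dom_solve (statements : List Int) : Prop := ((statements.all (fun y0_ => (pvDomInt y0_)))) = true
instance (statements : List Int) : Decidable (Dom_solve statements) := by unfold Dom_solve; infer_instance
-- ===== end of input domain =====

-- B replaces A's 11 filtering scans plus sort of the candidate lists by one counting pass
-- over an 11-slot table and a single collection pass for the first t with count[t] == t (simpler).

-- ===== PORT A =====
-- the comprehension '[i for i, val in enumerate(statements) if val == t]' (appears verbatim in both Pythons)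
def pyCollect (statements : List Int) (t : Int) : List Int :=
  (PySem.List.enumerate statements).foldl
    (fun acc p => if p.2 == t then acc ++ [p.1] else acc) []

def solve (statements : List Int) : List Int :=
  let candidates : List (List Int) :=
    (PySem.List.pyRange 0 11 1).foldl
      (fun acc t =>
        let truthful := pyCollect statements t
        if ((truthful.length : Int) == t) then acc ++ [truthful] else acc)
      []
  if candidates = [] then []
  else
    (PySem.List.sorted2 candidates (fun arr => (arr.length : Int)) (fun arr => arr)).headD []

-- ===== PORT B =====
def countsB (statements : List Int) : List Int :=
  statements.foldl
    (fun cs val =>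
      if 0 ≤ val ∧ val ≤ 10 then cs.set val.toNat (cs.getD val.toNat 0 + 1) else cs)
    (List.replicate 11 0)

-- the early-returning 'for t in range(11)' loop of B
def findB (statements : List Int) (counts : List Int) : List Int → List Int
  | [] => []
  | t :: ts =>
      if counts.getD t.toNat 0 == t then pyCollect statements t
      else findB statements counts ts

def solve_alt (statements : List Int) : List Int :=
  findB statements (countsB statements) (PySem.List.pyRange 0 11 1)

-- ===== PRECONDITION & SPEC =====
def Spec_solve (statements : List Int) (out : List Int) : Prop := out = solve_alt statements
instance (statements : List Int) (out : List Int) : Decidable (Spec_solve statements out) := by unfold Spec_solve; infer_instance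

-- ===== CLAIM (what is proved, stated in full; the proofs are below) =====
def Claim_equal_solve : Prop := ∀ (statements : List Int), Dom_solve statements → Spec_solve statements (solve statements)

-- ===== LEMMAS AND PROOFS =====

lemma pyCollect_gen (t : Int) :
    ∀ (l : List (Int × Int)) (init : List Int),
      l.foldl (fun acc p => if p.2 == t then acc ++ [p.1] else acc) init
        = init ++ (l.filter (fun p => p.2 == t)).map (·.1) := by
  intro l
  induction l with
  | nil => simp
  | cons p l ih =>
      intro init
      cases h : (p.2 == t) with
      | true => simp only [List.foldl_cons, List.filter_cons, h, if_true]; rw [ih]; simp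
      | false =>
          simp only [List.foldl_cons, List.filter_cons, h, Bool.false_eq_true, if_false]
          rw [ih]

lemma countP_enumerate (t : Int) :
    ∀ (s : List Int) (st : Int),
      (PySem.List.enumerate s st).countP (fun p => p.2 == t)
        = s.countP (fun v => v == t) := by
  intro s
  induction s with
  | nil => intro st; simp [PySem.List.enumerate_nil]
  | cons v s ih =>
      intro st
      simp [PySem.List.enumerate_cons, List.countP_cons, ih]

lemma length_pyCollect (s : List Int) (t : Int) :
    (pyCollect s t).length = s.countP (fun v => v == t) := by
  unfold pyCollect
  rw [pyCollect_gen]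
  simp only [List.nil_append, List.length_map]
  rw [← List.countP_eq_length_filter]
  exact countP_enumerate t s 0

lemma counts_getD (s : List Int) :
    ∀ (cs : List Int), cs.length = 11 → ∀ (j : Nat), j < 11 →
      (s.foldl
          (fun cs val =>
            if 0 ≤ val ∧ val ≤ 10 then cs.set val.toNat (cs.getD val.toNat 0 + 1) else cs)
          cs).getD j 0
        = cs.getD j 0 + (s.countP (fun v => v == (j : Int)) : Int) := by
  induction s with
  | nil => intro cs hlen j hj; simp
  | cons v s ih =>
      intro cs hlen j hj
      simp only [List.foldl_cons, List.countP_cons]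
      by_cases hv : 0 ≤ v ∧ v ≤ 10
      · rw [if_pos hv]
        have hlen' : (cs.set v.toNat (cs.getD v.toNat 0 + 1)).length = 11 := by
          simp [hlen]
        rw [ih _ hlen' j hj]
        by_cases hj' : v.toNat = j
        · have hv' : v = (j : Int) := by omega
          have : (cs.set v.toNat (cs.getD v.toNat 0 + 1)).getD j 0
              = cs.getD j 0 + 1 := by
            subst hj'
            simp [List.getD_eq_getElem?_getD, List.getElem?_set_self (by omega : v.toNat < cs.length)]
          rw [this]
          simp [hv']
          ring
        · have hv' : ¬ (v = (j : Int)) := by omega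
          have : (cs.set v.toNat (cs.getD v.toNat 0 + 1)).getD j 0 = cs.getD j 0 := by
            simp [List.getD_eq_getElem?_getD, List.getElem?_set_ne hj']
          rw [this]
          simp [hv']
      · rw [if_neg hv, ih _ hlen j hj]
        have hv' : ¬ (v = (j : Int)) := by omega
        simp [hv']

lemma condB_eq (s : List Int) (t : Int) (h0 : 0 ≤ t) (h1 : t < 11) :
    ((countsB s).getD t.toNat 0 == t) = (((pyCollect s t).length : Int) == t) := by
  unfold countsB
  rw [counts_getD s (List.replicate 11 0) (by simp) t.toNat (by omega)]
  have ht : ((t.toNat : Int)) = t := Int.toNat_of_nonneg h0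
  rw [length_pyCollect]
  have hrep : (List.replicate 11 (0 : Int)).getD t.toNat 0 = 0 := by
    have hlt : t.toNat < 11 := by omega
    rw [List.getD_eq_getElem?_getD, List.getElem?_replicate]
    simp [hlt]
  rw [hrep, ht]
  simp

lemma insertBy_last (before : List Int → List Int → Bool) (x : List Int) :
    ∀ (acc : List (List Int)), (∀ y ∈ acc, before x y = false) →
      PySem.List.insertBy before x acc = acc ++ [x] := by
  intro acc
  induction acc with
  | nil => intro _; simp [PySem.List.insertBy]
  | cons y ys ih =>
      intro h
      have hy : before x y = false := h y (by simp)
      have hstep : PySem.List.insertBy before x (y :: ys)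
          = y :: PySem.List.insertBy before x ys := by
        simp [PySem.List.insertBy, hy]
      rw [hstep, ih (fun z hz => h z (by simp [hz]))]
      simp

lemma foldl_insertBy (before : List Int → List Int → Bool) :
    ∀ (l acc : List (List Int)),
      (∀ y ∈ acc, ∀ x ∈ l, before x y = false) →
      l.Pairwise (fun a b => before b a = false) →
      l.foldl (fun acc x => PySem.List.insertBy before x acc) acc = acc ++ l := by
  intro l
  induction l with
  | nil => intro acc _ _; simp
  | cons x l ih =>
      intro acc hacc hpw
      simp only [List.foldl_cons]
      rw [insertBy_last before x acc (fun y hy => hacc y hy x (by simp))]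
      rw [ih (acc ++ [x]) ?_ (List.Pairwise.of_cons hpw)]
      · simp
      · intro y hy z hz
        rcases List.mem_append.1 hy with hy | hy
        · exact hacc y hy z (by simp [hz])
        · have : y = x := by simpa using hy
          subst this
          exact (List.pairwise_cons.1 hpw).1 z hz

lemma sorted2_eq_self (cs : List (List Int))
    (h : cs.Pairwise (fun a b => a.length < b.length)) :
    PySem.List.sorted2 cs (fun arr => ((arr.length : Int))) (fun arr => arr) = cs := by
  have hpb : cs.Pairwise (fun a b =>
      (decide (((b.length : Int)) < ((a.length : Int)))
        || (!decide (((a.length : Int)) < ((b.length : Int))) && decide (b < a))) = false) := by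
    refine h.imp ?_
    intro a b hab
    have h1 : ¬ ((b.length : Int) < (a.length : Int)) := by exact_mod_cast Nat.not_lt.2 hab.le
    have h2 : ((a.length : Int) < (b.length : Int)) := by exact_mod_cast hab
    simp [h1, h2]
  rw [show PySem.List.sorted2 cs (fun arr => ((arr.length : Int))) (fun arr => arr)
      = List.foldl (fun acc x => PySem.List.insertBy
          (fun a b => decide (((a.length : Int)) < ((b.length : Int)))
            || (!decide (((b.length : Int)) < ((a.length : Int))) && decide (a < b))) x acc) [] cs
      from rfl]
  rw [foldl_insertBy _ cs [] (by simp) hpb]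
  simp

lemma fold_cand (s : List Int) :
    ∀ (l : List Int) (init : List (List Int)),
      l.foldl
          (fun acc t =>
            let truthful := pyCollect s t
            if ((truthful.length : Int) == t) then acc ++ [truthful] else acc)
          init
        = init ++ (l.filter (fun t => ((pyCollect s t).length : Int) == t)).map (pyCollect s) := by
  intro l
  induction l with
  | nil => intro init; simp
  | cons t l ih =>
      intro init
      cases h : (((pyCollect s t).length : Int) == t) with
      | true =>
          simp only [List.foldl_cons, List.filter_cons, h, if_true]
          rw [ih]; simp
      | false =>
          simp only [List.foldl_cons, List.filter_cons, h, Bool.false_eq_true, if_false]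
          rw [ih]

lemma main_lemma (s : List Int) :
    ∀ (ts : List Int), ts.Pairwise (· < ·) →
      (∀ t ∈ ts, ((countsB s).getD t.toNat 0 == t) = (((pyCollect s t).length : Int) == t)) →
      (let cs := (ts.filter (fun t => ((pyCollect s t).length : Int) == t)).map (pyCollect s)
       if cs = [] then []
       else (PySem.List.sorted2 cs (fun arr => ((arr.length : Int))) (fun arr => arr)).headD [])
        = findB s (countsB s) ts := by
  intro ts
  induction ts with
  | nil => intro _ _; simp [findB]
  | cons t ts ih =>
      intro hpw hcond
      have hcondt := hcond t (by simp)
      cases hc : (((pyCollect s t).length : Int) == t) with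
      | true =>
        -- first hit: A's head of sorted candidates is this list; B returns it
        simp only [List.filter_cons, hc, if_true]
        have base : (t :: ts.filter (fun u => ((pyCollect s u).length : Int) == u)).Pairwise (· < ·) := by
          refine List.Pairwise.sublist ?_ hpw
          exact List.cons_sublist_cons.2 List.filter_sublist
        have hmemlen : ∀ u ∈ t :: ts.filter (fun u => ((pyCollect s u).length : Int) == u),
            ((pyCollect s u).length : Int) = u := by
          intro u hu
          rcases List.mem_cons.1 hu with hu | hu
          · subst hu; exact of_decide_eq_true hc
          · exact of_decide_eq_true ((List.mem_filter.1 hu).2)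
        have hlt : (t :: ts.filter (fun u => ((pyCollect s u).length : Int) == u)).Pairwise
            (fun a b => (pyCollect s a).length < (pyCollect s b).length) := by
          refine List.Pairwise.imp_of_mem ?_ base
          intro a b ha hb hab
          have ha' := hmemlen a ha
          have hb' := hmemlen b hb
          omega
        have hpair : ((List.map (pyCollect s)
            (t :: ts.filter (fun u => ((pyCollect s u).length : Int) == u)))).Pairwise
            (fun a b => a.length < b.length) := List.pairwise_map.2 hlt
        have hs2 := sorted2_eq_self _ hpair
        simp only [List.map_cons] at hs2 ⊢
        rw [if_neg (by simp), hs2]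
        simp only [List.headD_cons]
        have hB : ((countsB s).getD t.toNat 0 == t) = true := by rw [hcondt]; exact hc
        simp only [findB, hB, if_true]
      | false =>
        -- no hit at t: both sides fall through to ts
        have hB : ((countsB s).getD t.toNat 0 == t) = false := by rw [hcondt]; exact hc
        simp only [List.filter_cons, hc, Bool.false_eq_true, if_false]
        rw [ih (List.Pairwise.of_cons hpw) (fun u hu => hcond u (by simp [hu]))]
        simp only [findB, hB, Bool.false_eq_true, if_false]

-- ===== VERDICT (by name: the statement is the Claim_ definition above) =====
theorem solve_spec : Claim_equal_solve := by
  intro s _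
  unfold Spec_solve
  unfold solve solve_alt
  rw [fold_cand]
  simp only [List.nil_append]
  refine main_lemma s (PySem.List.pyRange 0 11 1) (PySem.List.pairwise_lt_pyRange_one 0 11) ?_
  intro t ht
  have := PySem.List.mem_pyRange_one.1 ht
  exact condB_eq s t this.1 this.2
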